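-- pv_equiv track=rewrite | github.com/dbetm/cp-history | AlgoExpert/hard/004_min_rewards.py | minRewards2
-- ===== SOURCE A (Python) =====
-- def minRewards2(scores: list) -> list:
--     """Proposal - similar to v1 - but more simple
--     Time: O(n)
--     Space: O(n)
--     """
--     n = len(scores)
--
--     rewards = [1] * n
--
--     # assign rewards to incresing ranges from left to right
--     for i in range(1, n):
--         if scores[i] > scores[i-1]:
--             rewards[i] = rewards[i-1] + 1
--
--     # assign rewards to increasing ranges from right to left
--     for i in range(n-2, -1, -1):
--         if scores[i] > scores[i+1]:
--             rewards[i] = max(rewards[i], rewards[i+1] + 1)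
--
--     return sum(rewards)
-- ===== SOURCE B (Python) =====
-- def minRewards2(scores: list) -> list:
--     """Run decomposition: the head of each strictly decreasing run of length d gets
--     max(l, d) where l is the increasing-run length ending there; the remaining run
--     elements contribute d-1, ..., 1, added in closed form.  One sweep, no array."""
--     n = len(scores)
--     total = 0
--     l = 1  # length of the strictly increasing run ending at position i
--     i = 0
--     while i < n:
--         j = i + 1
--         while j < n and scores[j-1] > scores[j]:
--             j += 1
--         d = j - i  # strictly decreasing run scores[i..j-1]
--         total += max(l, d) + (d - 1) * d // 2
--         nl = l if d == 1 else 1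
--         l = nl + 1 if j < n and scores[j] > scores[j-1] else 1
--         i = j
--     return total
-- ===== Notes on version B (the rewrite author's own statement) =====
-- stated objective: alternative
-- what changed: B drops A's rewards array and its forward/backward mutation passes entirely: one index sweep decomposes the input into strictly decreasing runs, giving the run head max(l, d) (l = increasing-run length ending there) and the remaining d-1 run elements the closed-form series (d-1)*d//2.
import Mathlib
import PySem

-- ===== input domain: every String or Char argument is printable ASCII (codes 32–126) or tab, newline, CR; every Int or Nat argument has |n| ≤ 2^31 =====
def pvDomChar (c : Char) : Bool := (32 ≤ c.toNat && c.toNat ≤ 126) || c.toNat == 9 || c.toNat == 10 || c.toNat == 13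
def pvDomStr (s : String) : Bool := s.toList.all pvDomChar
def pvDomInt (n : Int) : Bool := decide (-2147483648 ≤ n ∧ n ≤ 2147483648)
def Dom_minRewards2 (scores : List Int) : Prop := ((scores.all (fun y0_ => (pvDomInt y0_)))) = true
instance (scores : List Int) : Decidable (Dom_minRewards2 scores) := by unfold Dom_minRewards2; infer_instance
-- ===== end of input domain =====

-- B replaces A's rewards array and its forward/backward mutation passes by one sweep that adds,
-- per element, max(increasing-run length ending here, decreasing-run length starting here); alternative, not faster.

-- ===== PORT A =====
-- body of A's first loop: `if scores[i] > scores[i-1]: rewards[i] = rewards[i-1] + 1` (indices 1 ≤ i < n)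
def pvFwStep (scores : List Int) (r : List Int) (i : Nat) : List Int :=
  if scores.getD i 0 > scores.getD (i-1) 0 then r.set i (r.getD (i-1) 0 + 1) else r

-- body of A's second loop: `if scores[i] > scores[i+1]: rewards[i] = max(rewards[i], rewards[i+1] + 1)`
def pvBwStep (scores : List Int) (r : List Int) (i : Nat) : List Int :=
  if scores.getD i 0 > scores.getD (i+1) 0 then r.set i (max (r.getD i 0) (r.getD (i+1) 0 + 1)) else r

def minRewards2 (scores : List Int) : Int :=
  let n := scores.length
  let rewards := List.replicate n (1 : Int)
  -- for i in range(1, n):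
  let rewards := (List.range' 1 (n-1)).foldl (pvFwStep scores) rewards
  -- for i in range(n-2, -1, -1):
  let rewards := ((List.range (n-1)).reverse).foldl (pvBwStep scores) rewards
  rewards.sum

-- ===== PORT B =====
-- inner while loop of Source B: advance j while j < n and scores[j-1] > scores[j]
-- (fuel is a totality guard only; scores.length steps always suffice)
def pvRunEnd (scores : List Int) (fuel : Nat) (j : Nat) : Nat :=
  match fuel with
  | 0 => j
  | f+1 => if j < scores.length ∧ scores.getD (j-1) 0 > scores.getD j 0 then pvRunEnd scores f (j+1) else j

-- outer while loop of Source B: state (total, l, i); fuel is a totality guard only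
def pvGoB (scores : List Int) (fuel : Nat) (total l : Int) (i : Nat) : Int :=
  match fuel with
  | 0 => total
  | f+1 =>
    if i < scores.length then
      let j := pvRunEnd scores scores.length (i+1)
      let d : Int := (j : Int) - (i : Int)
      let total' := total + max l d + PySem.Int.floordiv ((d - 1) * d) 2
      let nl := if d = 1 then l else 1
      let l' := if j < scores.length ∧ scores.getD j 0 > scores.getD (j-1) 0 then nl + 1 else 1
      pvGoB scores f total' l' j
    else total

def minRewards2_alt (scores : List Int) : Int := pvGoB scores (scores.length + 1) 0 1 0

-- ===== PRECONDITION & SPEC =====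
def Spec_minRewards2 (scores : List Int) (out : Int) : Prop := out = minRewards2_alt scores
instance (scores : List Int) (out : Int) : Decidable (Spec_minRewards2 scores out) := by unfold Spec_minRewards2; infer_instance

-- ===== CLAIM (what is proved, stated in full; the proofs are below) =====
def Claim_equal_minRewards2 : Prop := ∀ (scores : List Int), Dom_minRewards2 scores → Spec_minRewards2 scores (minRewards2 scores)

-- ===== LEMMAS AND PROOFS =====

-- L-values: pvF l p xs = increasing-run lengths along xs, given previous score p whose run length is l
def pvF (l p : Int) : List Int → List Int
  | [] => []
  | a :: t => (if a > p then l + 1 else 1) :: pvF (if a > p then l + 1 else 1) a t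

def pvLvals : List Int → List Int
  | [] => []
  | a :: t => 1 :: pvF 1 a t

-- the value A's backward pass produces on scores from intermediate array r
def pvBwd : List Int → List Int → List Int
  | a :: s', x :: r' =>
      (match s', pvBwd s' r' with
       | b :: _, y :: _ => if a > b then max x (y+1) else x
       | _, _ => x) :: pvBwd s' r'
  | _, _ => []

-- length of the strictly decreasing run at the head
def pvRun : List Int → Nat
  | a :: b :: t => if a > b then pvRun (b :: t) + 1 else 1
  | [_] => 1
  | [] => 0

-- per-element rewards max(L i, R i)
def pvBvals (l : Int) : List Int → List Int
  | [] => []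
  | a :: t => max l ((pvRun (a :: t) : Int)) ::
      pvBvals (match t with | b :: _ => if b > a then l + 1 else 1 | [] => 1) t

theorem pvRun_pos (a : Int) (t : List Int) : 1 ≤ pvRun (a :: t) := by
  cases t with
  | nil => simp [pvRun]
  | cons b t2 => simp only [pvRun]; split <;> omega

theorem pvF_length (xs : List Int) : ∀ l p : Int, (pvF l p xs).length = xs.length := by
  induction xs with
  | nil => intro l p; simp [pvF]
  | cons a t ih => intro l p; simp [pvF, ih]

theorem pvLvals_length (xs : List Int) : (pvLvals xs).length = xs.length := by
  cases xs with
  | nil => rfl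
  | cons a t => simp [pvLvals, pvF_length]

-- backward pass applied to the forward pass's values = the per-element rewards
theorem pvBwd_F (s' : List Int) : ∀ a l : Int, 1 ≤ l →
    pvBwd (a :: s') (l :: pvF l a s') = pvBvals l (a :: s') := by
  induction s' with
  | nil =>
    intro a l hl
    simp [pvBwd, pvBvals, pvRun]
    omega
  | cons b t ih =>
    intro a l hl
    have hl' : (1:Int) ≤ (if b > a then l + 1 else 1) := by split <;> omega
    have hih := ih b (if b > a then l + 1 else 1) hl'
    have hF : pvF l a (b :: t) = (if b > a then l + 1 else 1) :: pvF (if b > a then l + 1 else 1) b t := by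
      simp [pvF]
    rw [hF]
    have houter : pvBwd (a :: b :: t) (l :: (if b > a then l + 1 else 1) :: pvF (if b > a then l + 1 else 1) b t)
        = (match (b :: t : List Int), pvBwd (b :: t) ((if b > a then l + 1 else 1) :: pvF (if b > a then l + 1 else 1) b t) with
           | bb :: _, y :: _ => if a > bb then max l (y+1) else l
           | _, _ => l) :: pvBwd (b :: t) ((if b > a then l + 1 else 1) :: pvF (if b > a then l + 1 else 1) b t) := rfl
    rw [houter, hih]
    simp only [pvBvals]
    by_cases hab : a > b
    · have hba : ¬ b > a := by omega
      have h1 : pvRun (a :: b :: t) = pvRun (b :: t) + 1 := by simp [pvRun, hab]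
      have hge := pvRun_pos b t
      have hmax : max (1:Int) ((pvRun (b :: t) : Int)) = (pvRun (b :: t) : Int) := by
        have : (1:Int) ≤ (pvRun (b :: t) : Int) := by exact_mod_cast hge
        omega
      simp only [hba, hab, gt_iff_lt, ite_false, ite_true]
      rw [h1]
      simp [hmax]
    · have h1 : pvRun (a :: b :: t) = 1 := by simp [pvRun, hab]
      have hmax : max l (1:Int) = l := by omega
      simp [hab, h1, hmax]

-- unfolding equations for pvRun
theorem pvRun_cons_cons (x y : Int) (r : List Int) :
    pvRun (x :: y :: r) = if x > y then pvRun (y :: r) + 1 else 1 := rfl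

theorem pvRunEnd_ge (scores : List Int) : ∀ (fuel j : Nat), j ≤ pvRunEnd scores fuel j := by
  intro fuel
  induction fuel with
  | zero => intro j; simp [pvRunEnd]
  | succ f ih =>
    intro j
    rw [pvRunEnd]
    split
    · have := ih (j+1); omega
    · omega

theorem pvRunEnd_le (scores : List Int) : ∀ (fuel j : Nat), j ≤ scores.length →
    pvRunEnd scores fuel j ≤ scores.length := by
  intro fuel
  induction fuel with
  | zero => intro j hj; simpa [pvRunEnd] using hj
  | succ f ih =>
    intro j hj
    rw [pvRunEnd]
    split
    · next hc => exact ih (j+1) (by omega)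
    · exact hj

-- the inner while loop finds the end of the structural decreasing run
theorem pvRunEnd_eq (scores : List Int) : ∀ (fuel j : Nat), 1 ≤ j → j ≤ scores.length →
    scores.length ≤ j + fuel →
    pvRunEnd scores fuel j = j - 1 + pvRun (scores.drop (j-1)) := by
  intro fuel
  induction fuel with
  | zero =>
    intro j hj1 hjle hfuel
    have hje : j = scores.length := by omega
    have hj1lt : j - 1 < scores.length := by omega
    have hd1 : scores.drop (j-1) = scores.getD (j-1) 0 :: scores.drop j := by
      have e := List.drop_eq_getElem_cons hj1lt
      have e2 : j - 1 + 1 = j := by omega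
      rw [List.getD_eq_getElem _ _ hj1lt, e, e2]
    have hnil : scores.drop j = [] := by rw [hje]; simp
    rw [pvRunEnd, hd1, hnil]
    have h1 : pvRun [scores.getD (j-1) 0] = 1 := rfl
    rw [h1]
    omega
  | succ f ih =>
    intro j hj1 hjle hfuel
    have hj1lt : j - 1 < scores.length := by omega
    have hd1 : scores.drop (j-1) = scores.getD (j-1) 0 :: scores.drop j := by
      have e := List.drop_eq_getElem_cons hj1lt
      have e2 : j - 1 + 1 = j := by omega
      rw [List.getD_eq_getElem _ _ hj1lt, e, e2]
    rw [pvRunEnd]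
    by_cases hc : j < scores.length ∧ scores.getD (j-1) 0 > scores.getD j 0
    · have hjlt : j < scores.length := hc.1
      have hd2 : scores.drop j = scores.getD j 0 :: scores.drop (j+1) := by
        rw [List.drop_eq_getElem_cons hjlt, List.getD_eq_getElem _ _ hjlt]
      rw [if_pos hc, ih (j+1) (by omega) (by omega) (by omega)]
      simp only [Nat.add_sub_cancel]
      rw [hd1, hd2, pvRun_cons_cons, if_pos hc.2, ← hd2]
      omega
    · rw [if_neg hc]
      by_cases hje : j = scores.length
      · have hnil : scores.drop j = [] := by rw [hje]; simp
        rw [hd1, hnil]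
        have h1 : pvRun [scores.getD (j-1) 0] = 1 := rfl
        rw [h1]
        omega
      · have hjlt : j < scores.length := by omega
        have hd2 : scores.drop j = scores.getD j 0 :: scores.drop (j+1) := by
          rw [List.drop_eq_getElem_cons hjlt, List.getD_eq_getElem _ _ hjlt]
        have hng : ¬ scores.getD (j-1) 0 > scores.getD j 0 := fun hgt => hc ⟨hjlt, hgt⟩
        rw [hd1, hd2, pvRun_cons_cons, if_neg hng]
        omega

-- one decreasing run's worth of pvBvals, in closed form
theorem pvRunSum (t : List Int) : ∀ a l : Int, 1 ≤ l →
    (pvBvals l (a :: t)).sum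
      = max l ((pvRun (a :: t) : Int)) + ((pvRun (a :: t) : Int) - 1) * (pvRun (a :: t) : Int) / 2
        + (pvBvals (if pvRun (a :: t) < (a :: t).length ∧ (a :: t).getD (pvRun (a :: t)) 0 > (a :: t).getD (pvRun (a :: t) - 1) 0
                    then (if pvRun (a :: t) = 1 then l else 1) + 1 else 1)
            ((a :: t).drop (pvRun (a :: t)))).sum := by
  induction t with
  | nil =>
    intro a l hl
    simp [pvBvals, pvRun]
  | cons b t2 ih =>
    intro a l hl
    by_cases hab : a > b
    · have hba : ¬ b > a := by omega
      have hR : 1 ≤ pvRun (b :: t2) := pvRun_pos b t2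
      have hD : pvRun (a :: b :: t2) = pvRun (b :: t2) + 1 := by simp [pvRun, hab]
      have hih := ih b 1 (by omega)
      have hL : pvBvals l (a :: b :: t2)
          = max l ((pvRun (a :: b :: t2) : Int)) :: pvBvals (if b > a then l + 1 else 1) (b :: t2) := rfl
      rw [hL, if_neg hba, List.sum_cons, hih, hD]
      obtain ⟨R, hRe⟩ : ∃ R, pvRun (b :: t2) = R + 1 := ⟨pvRun (b :: t2) - 1, by omega⟩
      rw [hRe]
      have hdrop : (a :: b :: t2).drop (R + 1 + 1) = (b :: t2).drop (R + 1) := rfl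
      have hg1 : (a :: b :: t2).getD (R + 1 + 1) 0 = (b :: t2).getD (R + 1) 0 := rfl
      have hg2 : (a :: b :: t2).getD (R + 1 + 1 - 1) 0 = (b :: t2).getD (R + 1 - 1) 0 := by
        have e : R + 1 + 1 - 1 = (R + 1 - 1) + 1 := by omega
        rw [e, List.getD_cons_succ]
      have hlen : (R + 1 + 1 < (a :: b :: t2).length) ↔ (R + 1 < (b :: t2).length) := by
        simp
      have hcond : (R + 1 + 1 < (a :: b :: t2).length ∧ (a :: b :: t2).getD (R + 1 + 1) 0 > (a :: b :: t2).getD (R + 1 + 1 - 1) 0)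
          ↔ (R + 1 < (b :: t2).length ∧ (b :: t2).getD (R + 1) 0 > (b :: t2).getD (R + 1 - 1) 0) := by
        rw [hg1, hg2, hlen]
      have hC : (if R + 1 + 1 < (a :: b :: t2).length ∧ (a :: b :: t2).getD (R + 1 + 1) 0 > (a :: b :: t2).getD (R + 1 + 1 - 1) 0
                 then (if (R + 1 + 1 : Nat) = 1 then l else 1) + 1 else 1)
          = (if R + 1 < (b :: t2).length ∧ (b :: t2).getD (R + 1) 0 > (b :: t2).getD (R + 1 - 1) 0
             then (if (R + 1 : Nat) = 1 then (1:Int) else 1) + 1 else 1) := by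
        rw [if_neg (by omega : ¬ (R + 1 + 1 : Nat) = 1), ite_self]
        exact if_congr hcond rfl rfl
      rw [hC, hdrop]
      have hmax1 : max (1:Int) ((R + 1 : Nat) : Int) = ((R + 1 : Nat) : Int) := by
        have : (1:Int) ≤ ((R + 1 : Nat) : Int) := by exact_mod_cast Nat.le_add_left 1 R
        omega
      rw [hmax1]
      push_cast
      have e1 : ((R:Int) + 1 - 1) * ((R:Int) + 1) = (R:Int) * ((R:Int) + 1) := by ring
      have e2 : ((R:Int) + 1 + 1 - 1) * ((R:Int) + 1 + 1) = (R:Int) * ((R:Int) + 1) + ((R:Int) + 1) * 2 := by ring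
      rw [e1, e2, Int.add_mul_ediv_right _ _ (by norm_num : (2:Int) ≠ 0)]
      ring
    · have hD : pvRun (a :: b :: t2) = 1 := by simp [pvRun, hab]
      have hL : pvBvals l (a :: b :: t2)
          = max l ((pvRun (a :: b :: t2) : Int)) :: pvBvals (if b > a then l + 1 else 1) (b :: t2) := rfl
      have hcond : ((1:Nat) < (a :: b :: t2).length ∧ (a :: b :: t2).getD 1 0 > (a :: b :: t2).getD (1-1) 0) ↔ b > a := by
        constructor
        · intro hc; exact hc.2
        · intro hc; exact ⟨by simp, hc⟩
      rw [hL, hD, List.sum_cons]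
      by_cases hba2 : b > a
      · rw [if_pos hba2, if_pos (hcond.mpr hba2), if_pos rfl]
        show max l ((1:Nat):Int) + (pvBvals (l+1) (b :: t2)).sum
          = max l ((1:Nat):Int) + (((1:Nat):Int) - 1) * ((1:Nat):Int) / 2 + (pvBvals (l+1) ((a :: b :: t2).drop 1)).sum
        norm_num
      · rw [if_neg hba2, if_neg (fun hc => hba2 (hcond.mp hc))]
        show max l ((1:Nat):Int) + (pvBvals 1 (b :: t2)).sum
          = max l ((1:Nat):Int) + (((1:Nat):Int) - 1) * ((1:Nat):Int) / 2 + (pvBvals 1 ((a :: b :: t2).drop 1)).sum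
        norm_num

theorem pvGetD_drop (l : List Int) (i k : Nat) : (l.drop i).getD k 0 = l.getD (i+k) 0 := by
  rw [List.getD_eq_getElem?_getD, List.getD_eq_getElem?_getD, List.getElem?_drop]

-- B computed through pvBvals
theorem pvGoB_eq (scores : List Int) : ∀ (fuel : Nat) (total l : Int) (i : Nat),
    1 ≤ l → i ≤ scores.length → scores.length + 1 ≤ i + fuel →
    pvGoB scores fuel total l i = total + (pvBvals l (scores.drop i)).sum := by
  intro fuel
  induction fuel with
  | zero =>
    intro total l i _ hi hfuel
    omega
  | succ f ih =>
    intro total l i hl hi hfuel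
    by_cases h : i < scores.length
    · have hj_ge := pvRunEnd_ge scores scores.length (i+1)
      have hj_le := pvRunEnd_le scores scores.length (i+1) (by omega)
      have hj_eq := pvRunEnd_eq scores scores.length (i+1) (by omega) (by omega) (by omega)
      simp only [Nat.add_sub_cancel] at hj_eq
      set j := pvRunEnd scores scores.length (i+1) with hjdef
      set D := pvRun (scores.drop i) with hDdef
      have hstep : pvGoB scores (f+1) total l i
          = pvGoB scores f
              (total + max l ((j:Int) - (i:Int)) + PySem.Int.floordiv ((((j:Int) - (i:Int)) - 1) * ((j:Int) - (i:Int))) 2)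
              (if j < scores.length ∧ scores.getD j 0 > scores.getD (j-1) 0 then (if (j:Int) - (i:Int) = 1 then l else 1) + 1 else 1)
              j := by
        rw [pvGoB, if_pos h]
      obtain ⟨a', t', hat⟩ : ∃ a' t', scores.drop i = a' :: t' := by
        match hcd : scores.drop i with
        | [] =>
          have hlc := congrArg List.length hcd
          simp at hlc
          omega
        | x :: xs => exact ⟨x, xs, rfl⟩
      have hD1 : 1 ≤ D := by rw [hDdef, hat]; exact pvRun_pos _ _
      have hjeq' : j = i + D := hj_eq
      have hdcast : (j:Int) - (i:Int) = (D:Int) := by rw [hjeq']; push_cast; ring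
      have hsum := pvRunSum t' a' l hl
      rw [← hat] at hsum
      have hgd1 : (scores.drop i).getD D 0 = scores.getD j 0 := by
        rw [pvGetD_drop]; congr 1; omega
      have hgd2 : (scores.drop i).getD (D-1) 0 = scores.getD (j-1) 0 := by
        rw [pvGetD_drop]; congr 1; omega
      have hlen : (D < (scores.drop i).length) ↔ (j < scores.length) := by
        rw [List.length_drop]; omega
      have hdropD : (scores.drop i).drop D = scores.drop j := by
        rw [List.drop_drop]; congr 1; omega
      have hcondiff : (D < (scores.drop i).length ∧ (scores.drop i).getD D 0 > (scores.drop i).getD (D-1) 0)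
          ↔ (j < scores.length ∧ scores.getD j 0 > scores.getD (j-1) 0) := by
        rw [hgd1, hgd2, hlen]
      have hnl : (if (j:Int) - (i:Int) = 1 then l else 1) = (if D = 1 then l else 1) := by
        rw [hdcast]
        by_cases hDo : D = 1
        · simp [hDo]
        · rw [if_neg (by exact_mod_cast hDo), if_neg hDo]
      have hif : (if (D < (scores.drop i).length ∧ (scores.drop i).getD D 0 > (scores.drop i).getD (D-1) 0)
                    then (if D = 1 then l else 1) + 1 else 1)
          = (if (j < scores.length ∧ scores.getD j 0 > scores.getD (j-1) 0) then (if D = 1 then l else 1) + 1 else 1) :=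
        if_congr hcondiff rfl rfl
      have hl'1 : (1:Int) ≤ (if (j < scores.length ∧ scores.getD j 0 > scores.getD (j-1) 0) then (if D = 1 then l else 1) + 1 else 1) := by
        split
        · split <;> omega
        · omega
      rw [hstep, hnl]
      rw [ih _ _ j hl'1 (by omega) (by omega)]
      rw [hsum, hif, hdropD]
      rw [PySem.Int.floordiv_eq_ediv_of_pos (by norm_num)]
      rw [hdcast]
      ring
    · rw [pvGoB, if_neg h]
      have hie : i = scores.length := by omega
      rw [hie, List.drop_length]
      simp [pvBvals]

-- forward-pass bridge: the fold over range' i rest.length from a finished prefix P yields P ++ pvF l p rest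
theorem pvFwAux (scores : List Int) (rest : List Int) : ∀ (P : List Int) (p l : Int) (i : Nat),
    P.length = i → 1 ≤ i → scores.drop i = rest → scores.getD (i-1) 0 = p → P.getD (i-1) 0 = l →
    (List.range' i rest.length).foldl (pvFwStep scores) (P ++ List.replicate rest.length 1)
      = P ++ pvF l p rest := by
  induction rest with
  | nil => intro P p l i _ _ _ _ _; simp [pvF]
  | cons a t ih =>
    intro P p l i hP hi hdrop hsp hPl
    have hia : scores[i]? = some a := by
      have h0 : (scores.drop i)[0]? = scores[i+0]? := List.getElem?_drop ..
      rw [hdrop] at h0; simpa using h0.symm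
    have hsa : scores.getD i 0 = a := by rw [List.getD_eq_getElem?_getD, hia]; rfl
    have hdrop' : scores.drop (i+1) = t := by
      have h1 : (scores.drop i).drop 1 = scores.drop (i + 1) := List.drop_drop ..
      rw [hdrop] at h1
      simpa using h1.symm
    have him : i - 1 < P.length := by omega
    have hrl : (a :: t).length = t.length + 1 := rfl
    rw [hrl, List.range'_succ, List.foldl_cons, List.replicate_succ]
    have hstep : pvFwStep scores (P ++ 1 :: List.replicate t.length 1) i
        = (P ++ [if a > p then l + 1 else 1]) ++ List.replicate t.length 1 := by
      unfold pvFwStep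
      rw [hsa, hsp, List.getD_append _ _ _ _ him, hPl]
      by_cases hap : a > p
      · rw [if_pos hap, if_pos hap, ← hP]
        simp
      · rw [if_neg hap, if_neg hap]
        simp
    rw [hstep]
    have hres := ih (P ++ [if a > p then l + 1 else 1]) a (if a > p then l + 1 else 1) (i+1)
      (by simp [hP]) (by omega) hdrop' (by simpa using hsa)
      (by rw [List.getD_append_right _ _ _ _ (by simp [hP])]; simp [hP])
    rw [hres]
    simp [pvF]

-- backward-pass bridge: folding indices m-1 … 0 from a state whose suffix is already final
theorem pvBwAux (scores r : List Int) (hlen : r.length = scores.length) :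
    ∀ m : Nat, m + 1 ≤ scores.length →
    ((List.range m).reverse).foldl (pvBwStep scores) (r.take m ++ pvBwd (scores.drop m) (r.drop m))
      = pvBwd scores r := by
  intro m
  induction m with
  | zero => intro _; simp
  | succ m ih =>
    intro hm
    have hmlt : m < scores.length := by omega
    have hm1lt : m + 1 < scores.length := by omega
    have hrm : m < r.length := by omega
    have hrm1 : m + 1 < r.length := by omega
    have hsm : scores.drop m = scores.getD m 0 :: scores.drop (m+1) := by
      rw [List.drop_eq_getElem_cons hmlt, List.getD_eq_getElem _ _ hmlt]
    have hsm1 : scores.drop (m+1) = scores.getD (m+1) 0 :: scores.drop (m+2) := by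
      rw [List.drop_eq_getElem_cons hm1lt, List.getD_eq_getElem _ _ hm1lt]
    have hrm' : r.drop m = r.getD m 0 :: r.drop (m+1) := by
      rw [List.drop_eq_getElem_cons hrm, List.getD_eq_getElem _ _ hrm]
    have hrm1' : r.drop (m+1) = r.getD (m+1) 0 :: r.drop (m+2) := by
      rw [List.drop_eq_getElem_cons hrm1, List.getD_eq_getElem _ _ hrm1]
    obtain ⟨y, tl, hcons⟩ : ∃ y tl, pvBwd (scores.drop (m+1)) (r.drop (m+1)) = y :: tl := by
      rw [hsm1, hrm1']; exact ⟨_, _, rfl⟩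
    have htake : r.take (m+1) = r.take m ++ [r.getD m 0] := by
      rw [List.take_add_one, List.getElem?_eq_getElem hrm, List.getD_eq_getElem _ _ hrm]
      rfl
    have hlt : (r.take m).length = m := by simp; omega
    have hstate : r.take (m+1) ++ pvBwd (scores.drop (m+1)) (r.drop (m+1))
        = r.take m ++ (r.getD m 0 :: y :: tl) := by
      rw [htake, hcons]; simp
    have hstep : pvBwStep scores (r.take (m+1) ++ pvBwd (scores.drop (m+1)) (r.drop (m+1))) m
        = r.take m ++ pvBwd (scores.drop m) (r.drop m) := by
      rw [hstate]
      unfold pvBwStep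
      have hgm : (r.take m ++ (r.getD m 0 :: y :: tl)).getD m 0 = r.getD m 0 := by
        rw [List.getD_append_right _ _ _ _ (by omega)]
        simp [hlt]
      have hgm1 : (r.take m ++ (r.getD m 0 :: y :: tl)).getD (m+1) 0 = y := by
        rw [List.getD_append_right _ _ _ _ (by omega)]
        simp [hlt]
      have hrhs : pvBwd (scores.drop m) (r.drop m)
          = (if scores.getD m 0 > scores.getD (m+1) 0 then max (r.getD m 0) (y+1) else r.getD m 0)
            :: y :: tl := by
        rw [hsm, hrm']
        have hun : pvBwd (scores.getD m 0 :: scores.drop (m+1)) (r.getD m 0 :: r.drop (m+1))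
            = (match scores.drop (m+1), pvBwd (scores.drop (m+1)) (r.drop (m+1)) with
               | b :: _, y' :: _ => if scores.getD m 0 > b then max (r.getD m 0) (y'+1) else r.getD m 0
               | _, _ => r.getD m 0) :: pvBwd (scores.drop (m+1)) (r.drop (m+1)) := rfl
        rw [hun, hcons, hsm1]
      rw [hgm, hgm1, hrhs]
      by_cases hc : scores.getD m 0 > scores.getD (m+1) 0
      · rw [if_pos hc, if_pos hc, ← hlt]
        simp
      · rw [if_neg hc, if_neg hc]
    rw [List.range_succ, List.reverse_append]
    simp only [List.reverse_singleton, List.singleton_append, List.foldl_cons]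
    rw [hstep]
    exact ih (by omega)

-- A computed through pvBwd/pvLvals
theorem minRewards2_eq (scores : List Int) : minRewards2 scores = (pvBwd scores (pvLvals scores)).sum := by
  cases scores with
  | nil => rfl
  | cons a t =>
    have hfwd : (List.range' 1 ((a :: t).length - 1)).foldl (pvFwStep (a :: t)) (List.replicate (a :: t).length 1)
        = pvLvals (a :: t) := by
      have h := pvFwAux (a :: t) t [1] a 1 1 rfl (by omega) rfl rfl rfl
      simp [pvLvals, List.replicate_succ] at h ⊢
      exact h
    have hlen : (pvLvals (a :: t)).length = (a :: t).length := pvLvals_length _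
    set r := pvLvals (a :: t) with hr
    have hn : (a :: t).length = t.length + 1 := rfl
    have hstart : r.take t.length ++ pvBwd ((a :: t).drop t.length) (r.drop t.length) = r := by
      have hlt : t.length < (a :: t).length := by simp
      have hrlt : t.length < r.length := by rw [hlen]; simp
      have h1 : (a :: t).drop t.length = [(a :: t).getD t.length 0] := by
        rw [List.drop_eq_getElem_cons hlt, List.getD_eq_getElem _ _ hlt]
        have : (a :: t).drop (t.length + 1) = [] := by
          apply List.drop_eq_nil_of_le; simp
        rw [this]
      have h2 : r.drop t.length = [r.getD t.length 0] := by
        rw [List.drop_eq_getElem_cons hrlt, List.getD_eq_getElem _ _ hrlt]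
        have : r.drop (t.length + 1) = [] := by
          apply List.drop_eq_nil_of_le; rw [hlen]; simp
        rw [this]
      rw [h1, h2]
      have h3 : pvBwd [(a :: t).getD t.length 0] [r.getD t.length 0] = [r.getD t.length 0] := rfl
      rw [h3, ← h2, List.take_append_drop]
    have hbwd := pvBwAux (a :: t) r (by rw [hlen]) t.length (by simp)
    rw [hstart] at hbwd
    show ((List.range ((a :: t).length - 1)).reverse.foldl (pvBwStep (a :: t))
        ((List.range' 1 ((a :: t).length - 1)).foldl (pvFwStep (a :: t)) (List.replicate (a :: t).length 1))).sum
      = (pvBwd (a :: t) r).sum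
    rw [hfwd, hn]
    simp only [Nat.add_sub_cancel]
    rw [hbwd]

theorem minRewards2_alt_eq (scores : List Int) : minRewards2_alt scores = (pvBvals 1 scores).sum := by
  show pvGoB scores (scores.length + 1) 0 1 0 = _
  rw [pvGoB_eq scores (scores.length + 1) 0 1 0 (by omega) (by omega) (by omega)]
  simp

-- ===== VERDICT (by name: the statement is the Claim_ definition above) =====
theorem minRewards2_spec : Claim_equal_minRewards2 := by
  intro scores _
  show minRewards2 scores = minRewards2_alt scores
  rw [minRewards2_eq, minRewards2_alt_eq]
  cases scores with
  | nil => rfl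
  | cons a t =>
    have h : pvLvals (a :: t) = 1 :: pvF 1 a t := rfl
    rw [h, pvBwd_F t a 1 (by omega)]
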